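-- pv_equiv track=rewrite | github.com/sprauser-coder/Cataloro | phase3d_backend_test.py | verify_price_filtering
-- ===== SOURCE A (Python) =====
-- def verify_price_filtering(listings, params):
--     """Verify price filtering is working correctly"""
--     min_price = params.get("min_price")
--     max_price = params.get("max_price")
--
--     for listing in listings:
--         # Get price from either fixed price or current bid
--         price = listing.get("price") or listing.get("current_bid", 0)
--
--         if min_price is not None and price < min_price:
--             return False
--         if max_price is not None and price > max_price:
--             return False
--
--     return True
-- ===== SOURCE B (Python) =====
-- def verify_price_filtering(listings, params):
--     """Verify price filtering is working correctly"""
--     min_price = params.get("min_price")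
--     max_price = params.get("max_price")
--
--     prices = [l.get("price") or l.get("current_bid", 0) for l in listings]
--
--     if min_price is not None and prices and min(prices) < min_price:
--         return False
--     if max_price is not None and prices and max(prices) > max_price:
--         return False
--     return True
-- ===== Notes on version B (the rewrite author's own statement) =====
-- stated objective: alternative
-- what changed: B first builds the list of effective prices with a comprehension and then compares only the aggregate min/max against the bounds, instead of A's scan that tests each listing against both bounds with an early return.
import Mathlib
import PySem

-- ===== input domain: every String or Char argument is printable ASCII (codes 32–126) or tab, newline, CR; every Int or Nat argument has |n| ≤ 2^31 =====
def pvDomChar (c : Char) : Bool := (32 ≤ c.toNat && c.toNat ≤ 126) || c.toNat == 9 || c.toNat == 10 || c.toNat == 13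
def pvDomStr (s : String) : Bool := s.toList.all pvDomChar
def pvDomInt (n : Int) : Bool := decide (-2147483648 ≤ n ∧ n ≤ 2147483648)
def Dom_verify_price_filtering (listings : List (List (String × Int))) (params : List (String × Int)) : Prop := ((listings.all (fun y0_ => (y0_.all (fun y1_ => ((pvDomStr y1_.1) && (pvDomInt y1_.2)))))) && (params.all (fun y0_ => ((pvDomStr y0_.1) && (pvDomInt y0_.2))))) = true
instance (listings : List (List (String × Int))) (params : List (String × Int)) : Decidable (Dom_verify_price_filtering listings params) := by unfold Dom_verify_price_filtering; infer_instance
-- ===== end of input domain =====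

-- B computes the same verdict by reducing the effective prices to their min/max and comparing
-- only those aggregates against the bounds, instead of A's per-listing scan with early return.
-- (alternative decomposition; same O(n) cost)

-- shared helper: `listing.get("price") or listing.get("current_bid", 0)` (Python `or`: 0 and None are falsy)
def pvEff (listing : List (String × Int)) : Int :=
  match (PySem.Dict.mk listing).get? "price" with
  | some v => if v ≠ 0 then v else (PySem.Dict.mk listing).getD "current_bid" 0
  | none => (PySem.Dict.mk listing).getD "current_bid" 0

-- ===== PORT A =====
def pvGoA (mn mx : Option Int) : List (List (String × Int)) → Bool
  | [] => true
  | l :: rest =>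
    let price := pvEff l
    if (match mn with | some v => decide (price < v) | none => false) then false
    else if (match mx with | some v => decide (price > v) | none => false) then false
    else pvGoA mn mx rest

def verify_price_filtering (listings : List (List (String × Int))) (params : List (String × Int)) : Bool :=
  pvGoA ((PySem.Dict.mk params).get? "min_price") ((PySem.Dict.mk params).get? "max_price") listings

-- ===== PORT B =====
def verify_price_filtering_alt (listings : List (List (String × Int))) (params : List (String × Int)) : Bool :=
  let mn := (PySem.Dict.mk params).get? "min_price"
  let mx := (PySem.Dict.mk params).get? "max_price"
  let prices := listings.map pvEff
  if (match mn, PySem.List.min? prices (fun x => x) with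
      | some v, some m => decide (m < v) | _, _ => false) then false
  else if (match mx, PySem.List.max? prices (fun x => x) with
      | some v, some m => decide (m > v) | _, _ => false) then false
  else true

-- ===== PRECONDITION & SPEC =====
def Spec_verify_price_filtering (listings : List (List (String × Int))) (params : List (String × Int)) (out : Bool) : Prop := out = verify_price_filtering_alt listings params
instance (listings : List (List (String × Int))) (params : List (String × Int)) (out : Bool) : Decidable (Spec_verify_price_filtering listings params out) := by unfold Spec_verify_price_filtering; infer_instance

-- ===== CLAIM (what is proved, stated in full; the proofs are below) =====
def Claim_equal_verify_price_filtering : Prop := ∀ (listings : List (List (String × Int))) (params : List (String × Int)), Dom_verify_price_filtering listings params → Spec_verify_price_filtering listings params (verify_price_filtering listings params)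

-- ===== LEMMAS AND PROOFS =====

-- A's scan equals "no element violates either bound"
lemma goA_eq_all (mn mx : Option Int) (ls : List (List (String × Int))) :
    pvGoA mn mx ls =
      ((ls.map pvEff).all (fun p =>
        !(match mn with | some v => decide (p < v) | none => false) &&
        !(match mx with | some v => decide (p > v) | none => false))) := by
  induction ls with
  | nil => rfl
  | cons l rest ih =>
    simp only [pvGoA, List.map, List.all_cons, ih]
    cases hmn : (match mn with | some v => decide (pvEff l < v) | none => false) <;>
      cases hmx : (match mx with | some v => decide (pvEff l > v) | none => false) <;> simp

-- "min of the list violates the lower bound" equals "some element violates it"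
lemma min_viol (prices : List Int) (v : Int) :
    (match PySem.List.min? prices (fun x => x) with
      | some m => decide (m < v) | none => false) =
      prices.any (fun p => decide (p < v)) := by
  cases prices with
  | nil => simp [PySem.List.min?]
  | cons a t =>
    obtain ⟨m, hm⟩ : ∃ m, PySem.List.min? (a :: t) (fun x => x) = some m := by
      cases h : PySem.List.min? (a :: t) (fun x => x) with
      | none => exact absurd ((PySem.List.min?_eq_none_iff _ _).mp h) (by simp)
      | some m => exact ⟨m, rfl⟩
    rw [hm]
    have hmem := PySem.List.min?_mem hm
    have hmin := PySem.List.min?_isMin hm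
    by_cases hlt : m < v
    · simp only [decide_eq_true hlt]
      exact (List.any_eq_true.mpr ⟨m, hmem, decide_eq_true hlt⟩).symm
    · simp only [decide_eq_false hlt]
      symm; rw [List.any_eq_false]
      intro p hp
      simp only [decide_eq_true_eq]
      exact fun h => hlt (lt_of_le_of_lt (hmin p hp) h)

-- "max of the list violates the upper bound" equals "some element violates it"
lemma max_viol (prices : List Int) (v : Int) :
    (match PySem.List.max? prices (fun x => x) with
      | some m => decide (m > v) | none => false) =
      prices.any (fun p => decide (p > v)) := by
  cases prices with
  | nil => simp [PySem.List.max?]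
  | cons a t =>
    obtain ⟨m, hm⟩ : ∃ m, PySem.List.max? (a :: t) (fun x => x) = some m := by
      cases h : PySem.List.max? (a :: t) (fun x => x) with
      | none => exact absurd ((PySem.List.max?_eq_none_iff _ _).mp h) (by simp)
      | some m => exact ⟨m, rfl⟩
    rw [hm]
    have hmem := PySem.List.max?_mem hm
    have hmax := PySem.List.max?_isMax hm
    by_cases hlt : m > v
    · simp only [decide_eq_true hlt]
      exact (List.any_eq_true.mpr ⟨m, hmem, decide_eq_true hlt⟩).symm
    · simp only [decide_eq_false hlt]
      symm; rw [List.any_eq_false]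
      intro p hp
      simp only [decide_eq_true_eq]
      exact fun h => hlt (lt_of_lt_of_le h (hmax p hp))

lemma opt_viol_min (mn : Option Int) (prices : List Int) :
    (match mn, PySem.List.min? prices (fun x => x) with
      | some v, some m => decide (m < v) | _, _ => false) =
      prices.any (fun p => match mn with | some v => decide (p < v) | none => false) := by
  cases mn with
  | none => simp
  | some v =>
    have := min_viol prices v
    cases h : PySem.List.min? prices (fun x => x) <;> rw [h] at this <;> simpa using this

lemma opt_viol_max (mx : Option Int) (prices : List Int) :
    (match mx, PySem.List.max? prices (fun x => x) with
      | some v, some m => decide (m > v) | _, _ => false) =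
      prices.any (fun p => match mx with | some v => decide (p > v) | none => false) := by
  cases mx with
  | none => simp
  | some v =>
    have := max_viol prices v
    cases h : PySem.List.max? prices (fun x => x) <;> rw [h] at this <;> simpa using this

-- ===== VERDICT (by name: the statement is the Claim_ definition above) =====
theorem verify_price_filtering_spec : Claim_equal_verify_price_filtering := by
  intro listings params _
  unfold Spec_verify_price_filtering verify_price_filtering verify_price_filtering_alt
  dsimp only
  rw [goA_eq_all, opt_viol_min, opt_viol_max]
  set mn := (PySem.Dict.mk params).get? "min_price"
  set mx := (PySem.Dict.mk params).get? "max_price"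
  set prices := listings.map pvEff
  cases h1 : prices.any (fun p => match mn with | some v => decide (p < v) | none => false) <;>
    cases h2 : prices.any (fun p => match mx with | some v => decide (p > v) | none => false) <;>
      simp_all [List.all_eq_not_any_not, List.any_eq_true, List.any_eq_false]
  case false.true => obtain ⟨x, hx, h⟩ := h2; exact ⟨x, hx, Or.inr h⟩
  case true.false => obtain ⟨x, hx, h⟩ := h1; exact ⟨x, hx, Or.inl h⟩
  case true.true => obtain ⟨x, hx, h⟩ := h1; exact ⟨x, hx, Or.inl h⟩
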